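-- pv_equiv track=rewrite | github.com/Hyojeong721/TIL | SWA/0811/nyl2353/연습문제_2/s1.py | is_zero_subset
-- ===== SOURCE A (Python) =====
-- def is_zero_subset(arr):
--     cnt = 0
--     for i in range(1 << 10):
--         # 부분집합 1개 만들기 시작
--         sub_sum = 0
--         for j in range(10):
--             if i & (1 << j):
--                 sub_sum += arr[j]
--         # 완성된 부분집합 1개 원소들의 합이 0이면 1 반환
--         # 원소가 하나도 없어서 합이 0인 경우 처리 위해 cnt 셈
--         if sub_sum == 0:
--             cnt += 1
--             if cnt == 2:
--                 return 1
--
--     # 합이 0인 부분집합 없이 끝나면 0 반환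
--     return 0
-- ===== SOURCE B (Python) =====
-- def is_zero_subset(arr):
--     # DP over the set of achievable non-empty subset sums of arr[0..9],
--     # answering as soon as sum 0 becomes achievable
--     sums = set()
--     for i in range(10):
--         x = arr[i]
--         sums = sums | {s + x for s in sums} | {x}
--         if 0 in sums:
--             return 1
--     return 0
-- ===== Notes on version B (the rewrite author's own statement) =====
-- stated objective: alternative
-- what changed: A scans all 1024 bitmasks recomputing each subset sum from scratch (with a counter to skip the empty subset); B does a 10-step dynamic programming pass that maintains the set of achievable non-empty subset sums and checks membership of 0.
import Mathlib
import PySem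

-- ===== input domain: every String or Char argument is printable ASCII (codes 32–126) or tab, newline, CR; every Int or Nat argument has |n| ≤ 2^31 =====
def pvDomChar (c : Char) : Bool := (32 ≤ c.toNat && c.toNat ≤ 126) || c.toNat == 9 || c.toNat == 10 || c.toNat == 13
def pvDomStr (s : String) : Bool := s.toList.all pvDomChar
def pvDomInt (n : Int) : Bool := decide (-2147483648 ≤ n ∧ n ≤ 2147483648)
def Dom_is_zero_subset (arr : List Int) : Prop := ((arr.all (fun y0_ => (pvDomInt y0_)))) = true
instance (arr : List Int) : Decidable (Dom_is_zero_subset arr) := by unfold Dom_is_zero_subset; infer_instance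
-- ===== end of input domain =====

-- B replaces A's scan of all 1024 bitmasks by a set-DP over achievable non-empty subset sums
-- (simpler/alternative decomposition; same exact result).

-- ===== PORT A =====
-- inner loop of A: sub_sum of the subset selected by mask i; Python's `1 << j` is `(1:Int) <<< j.toNat`
-- (j ∈ range(10) is nonnegative, so the shift is exact); arr[j] is pyGetD under Pre_ (10 ≤ arr.length).
def pySubSum (arr : List Int) (i : Int) : Int :=
  (PySem.List.pyRange 0 10 1).foldl
    (fun sub_sum j =>
      if PySem.Int.band i ((1:Int) <<< j.toNat) ≠ 0 then sub_sum + PySem.List.pyGetD arr j 0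
      else sub_sum) 0

-- the `for i in range(1 << 10)` loop with the cnt counter and the early `return 1`
def isZeroLoopA (arr : List Int) : List Int → Int → Int
  | [], _cnt => 0
  | i :: rest, cnt =>
    let sub_sum := pySubSum arr i
    if sub_sum = 0 then
      if cnt + 1 = 2 then 1 else isZeroLoopA arr rest (cnt + 1)
    else isZeroLoopA arr rest cnt

def is_zero_subset (arr : List Int) : Int :=
  isZeroLoopA arr (PySem.List.pyRange 0 ((1:Int) <<< 10) 1) 0

-- ===== PORT B =====
-- the for-loop with its early `return 1`: sums = sums | {s + x for s in sums} | {x}; return 1 once 0 in sums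
def isZeroLoopB (arr : List Int) : List Int → PySem.Set Int → Int
  | [], _sums => 0
  | i :: rest, sums =>
    let x := PySem.List.pyGetD arr i 0
    let sums' := PySem.Set.add (PySem.Set.update sums (sums.map (fun s => s + x))) x
    if PySem.Set.contains sums' 0 then 1 else isZeroLoopB arr rest sums'

def is_zero_subset_alt (arr : List Int) : Int :=
  isZeroLoopB arr (PySem.List.pyRange 0 10 1) PySem.Set.empty

-- ===== PRECONDITION & SPEC =====
-- arr[j] as both ports read it (the default is never reached under Pre_ before the answer is fixed),
-- and the subset sum selected by mask n (bits below 10)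
def pvV (arr : List Int) (j : Nat) : Int := PySem.List.pyGetD arr (j : Int) 0
def pvMsum (arr : List Int) (n : Nat) : Int :=
  ∑ j ∈ Finset.range 10, (if n.testBit j then pvV arr j else 0)

-- Pre_ is exactly where Python A returns (no IndexError): either all ten indices exist, or some
-- non-empty subset of the existing prefix already sums to zero, so A's `return 1` fires before
-- any out-of-range read; Python B raises on exactly the same inputs.
def Pre_is_zero_subset (arr : List Int) : Prop :=
  10 ≤ arr.length ∨
    ∃ n ∈ List.range (2 ^ Nat.min arr.length 10), 1 ≤ n ∧ pvMsum arr n = 0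
instance (arr : List Int) : Decidable (Pre_is_zero_subset arr) := by unfold Pre_is_zero_subset; infer_instance
def pvWitness_is_zero_subset : List Int := [1, 2, 3, 4, 5, 6, 7, 8, 9, 10]

def Spec_is_zero_subset (arr : List Int) (out : Int) : Prop := out = is_zero_subset_alt arr
instance (arr : List Int) (out : Int) : Decidable (Spec_is_zero_subset arr out) := by unfold Spec_is_zero_subset; infer_instance

-- ===== CLAIM (what is proved, stated in full; the proofs are below) =====
def Claim_equal_is_zero_subset : Prop := ∀ (arr : List Int), Dom_is_zero_subset arr → Pre_is_zero_subset arr → Spec_is_zero_subset arr (is_zero_subset arr)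

-- ===== LEMMAS AND PROOFS =====

def pvStep (arr : List Int) (sums : PySem.Set Int) (k : Nat) : PySem.Set Int :=
  PySem.Set.add (PySem.Set.update sums (sums.map (fun s => s + pvV arr k))) (pvV arr k)

lemma pvBit (n k : Nat) :
    (PySem.Int.band (n : Int) ((1:Int) <<< ((((k : Int)).toNat : Nat) : Int)) = 0)
      ↔ n.testBit k = false := by
  rw [Int.toNat_natCast,
    show ((1:Int) <<< ((k : Int))) = ((1 <<< k : Nat) : Int) from by
      exact_mod_cast Int.shiftLeft_natCast 1 k,
    PySem.Int.band_natCast]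
  cases h : n.testBit k
  · simp [Nat.shiftLeft_eq, Nat.and_two_pow, h]
  · simp [Nat.shiftLeft_eq, Nat.and_two_pow, h]

lemma pvFoldSum (c : Nat → Bool) (w : Nat → Int) (m : Nat) (init : Int) :
    (List.range m).foldl (fun s j => if c j then s + w j else s) init
      = init + ∑ j ∈ Finset.range m, (if c j then w j else 0) := by
  induction m with
  | zero => simp
  | succ m ih =>
    simp only [List.range_succ, List.foldl_append, List.foldl_cons, List.foldl_nil,
      Finset.sum_range_succ, ih]
    by_cases h : c m
    · simp [h]; ring
    · simp [h]

lemma pvSubSum_natCast (arr : List Int) (n : Nat) : pySubSum arr (n : Int) = pvMsum arr n := by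
  unfold pySubSum pvMsum
  rw [show (10:Int) = ((10:Nat):Int) by norm_num, PySem.List.pyRange_zero_nat, List.foldl_map]
  rw [PySem.List.foldl_congr_mem _ _
      (fun s (j : Nat) => if n.testBit j then s + pvV arr j else s) 0 ?_]
  · rw [pvFoldSum (fun j => n.testBit j) (pvV arr) 10 0]; simp
  · intro acc k _
    simp only [ne_eq, pvBit, Bool.not_eq_false, pvV]

lemma pvMsum_zero (arr : List Int) : pvMsum arr 0 = 0 := by
  simp [pvMsum]

lemma pvMsum_pow_add (arr : List Int) {k m : Nat} (hk : k < 10) (hm : m < 2 ^ k) :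
    pvMsum arr (2 ^ k + m) = pvMsum arr m + pvV arr k := by
  have hor : 2 ^ k + m = 2 ^ k ||| m := by
    simpa using Nat.two_pow_add_eq_or_of_lt hm 1
  unfold pvMsum
  rw [hor]
  have hcong : ∀ j ∈ Finset.range 10,
      (if (2 ^ k ||| m).testBit j then pvV arr j else 0)
        = (if m.testBit j then pvV arr j else 0) + (if j = k then pvV arr k else 0) := by
    intro j _
    by_cases hjk : j = k
    · subst hjk
      simp [Nat.testBit_or, Nat.testBit_lt_two_pow hm]
    · simp only [Nat.testBit_or, Nat.testBit_two_pow]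
      simp [(Ne.symm hjk : k ≠ j), hjk]
  rw [Finset.sum_congr rfl hcong, Finset.sum_add_distrib,
    Finset.sum_ite_eq' (Finset.range 10) k (fun _ => pvV arr k)]
  simp [Finset.mem_range.mpr hk]

lemma pvMsum_pow (arr : List Int) {k : Nat} (hk : k < 10) : pvMsum arr (2 ^ k) = pvV arr k := by
  simpa [pvMsum_zero] using pvMsum_pow_add arr (m := 0) hk (Nat.two_pow_pos k)

-- ===== A side: characterisation =====
lemma pvLoopA (arr : List Int) (l : List Nat) :
    isZeroLoopA arr (l.map (fun (n : Nat) => (n : Int))) 1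
      = if (∃ n ∈ l, pvMsum arr n = 0) then 1 else 0 := by
  induction l with
  | nil => rw [if_neg (by simp)]; rfl
  | cons n t ih =>
    simp only [List.map_cons, isZeroLoopA, pvSubSum_natCast]
    by_cases h : pvMsum arr n = 0
    · simp [h]
    · simp [h, ih]

lemma pvAeq (arr : List Int) :
    is_zero_subset arr
      = if (∃ n ∈ List.map Nat.succ (List.range 1023), pvMsum arr n = 0) then 1 else 0 := by
  unfold is_zero_subset
  rw [show ((1:Int) <<< 10) = ((1024:Nat):Int) by decide, PySem.List.pyRange_zero_nat,
    show (1024:Nat) = 1023 + 1 from rfl, List.range_succ_eq_map, List.map_cons]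
  have h1 : isZeroLoopA arr
        ((((0:Nat)):Int) :: (List.map Nat.succ (List.range 1023)).map (fun (k : Nat) => (k : Int))) 0
      = isZeroLoopA arr
        ((List.map Nat.succ (List.range 1023)).map (fun (k : Nat) => (k : Int))) 1 := by
    have hz : pySubSum arr 0 = 0 := by simpa [pvMsum_zero] using pvSubSum_natCast arr 0
    simp [isZeroLoopA, hz]
  rw [h1, pvLoopA]

-- ===== B side: invariant of the set DP =====
lemma pvBinv (arr : List Int) :
    ∀ (k : Nat), k ≤ 10 → ∀ (y : Int),
      (y ∈ (List.range k).foldl (pvStep arr) PySem.Set.empty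
        ↔ ∃ n, n < 2 ^ k ∧ 1 ≤ n ∧ pvMsum arr n = y) := by
  intro k
  induction k with
  | zero =>
    intro _ y
    simp only [List.range_zero, List.foldl_nil]
    constructor
    · intro h; exact absurd h (by simp [PySem.Set.empty])
    · rintro ⟨n, h2, h1, _⟩; omega
  | succ k ih =>
    intro hk y
    have hk' : k < 10 := by omega
    have ih := ih (by omega)
    have h2p : 2 ^ (k + 1) = 2 ^ k + 2 ^ k := by ring
    have hpos := Nat.two_pow_pos k
    simp only [List.range_succ, List.foldl_append, List.foldl_cons, List.foldl_nil]
    rw [pvStep]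
    rw [PySem.Set.mem_add, PySem.Set.mem_update]
    simp only [List.mem_map, ih]
    constructor
    · rintro ((⟨n, h2, h1, hs⟩ | ⟨s, ⟨n, h2, h1, hs⟩, hy⟩) | hy)
      · exact ⟨n, by omega, h1, hs⟩
      · refine ⟨2 ^ k + n, by omega, by omega, ?_⟩
        rw [pvMsum_pow_add arr hk' h2, hs, hy]
      · exact ⟨2 ^ k, by omega, by omega, by rw [pvMsum_pow arr hk', hy]⟩
    · rintro ⟨n, h2, h1, hs⟩
      by_cases hlt : n < 2 ^ k
      · exact Or.inl (Or.inl ⟨n, hlt, h1, hs⟩)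
      · by_cases heq : n = 2 ^ k
        · subst heq
          exact Or.inr (by rw [← hs, pvMsum_pow arr hk'])
        · have hm1 : 1 ≤ n - 2 ^ k := by omega
          have hm2 : n - 2 ^ k < 2 ^ k := by omega
          refine Or.inl (Or.inr ⟨pvMsum arr (n - 2 ^ k), ⟨n - 2 ^ k, hm2, hm1, rfl⟩, ?_⟩)
          rw [← pvMsum_pow_add arr hk' hm2, show 2 ^ k + (n - 2 ^ k) = n by omega, hs]

lemma pvStepMono (arr : List Int) (S : PySem.Set Int) (k : Nat) (y : Int) (h : y ∈ S) :
    y ∈ pvStep arr S k := by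
  rw [pvStep, PySem.Set.mem_add, PySem.Set.mem_update]
  exact Or.inl (Or.inl h)

lemma pvFoldMono (arr : List Int) (l : List Nat) :
    ∀ (S : PySem.Set Int) (y : Int), y ∈ S → y ∈ l.foldl (pvStep arr) S := by
  induction l with
  | nil => intro S y h; simpa using h
  | cons k t ih =>
    intro S y h
    simp only [List.foldl_cons]
    exact ih _ _ (pvStepMono arr S k y h)

lemma pvLoopB (arr : List Int) (l : List Nat) :
    ∀ (S : PySem.Set Int), (0:Int) ∉ S →
      isZeroLoopB arr (l.map (fun (n : Nat) => (n : Int))) S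
        = if (0:Int) ∈ l.foldl (pvStep arr) S then 1 else 0 := by
  induction l with
  | nil =>
    intro S h
    rw [List.foldl_nil, if_neg h]
    rfl
  | cons k t ih =>
    intro S h
    simp only [List.map_cons, isZeroLoopB, List.foldl_cons]
    rw [show (PySem.Set.add (PySem.Set.update S
          (S.map (fun s => s + PySem.List.pyGetD arr ((k:Nat):Int) 0)))
          (PySem.List.pyGetD arr ((k:Nat):Int) 0)) = pvStep arr S k from rfl]
    by_cases h0 : (0:Int) ∈ pvStep arr S k
    · simp [h0, pvFoldMono arr t (pvStep arr S k) 0 h0]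
    · simp only [ih (pvStep arr S k) h0]
      simp [h0]

lemma pvBeq (arr : List Int) :
    is_zero_subset_alt arr
      = if (0:Int) ∈ (List.range 10).foldl (pvStep arr) PySem.Set.empty then 1 else 0 := by
  unfold is_zero_subset_alt
  rw [show (10:Int) = ((10:Nat):Int) by norm_num, PySem.List.pyRange_zero_nat]
  exact pvLoopB arr (List.range 10) PySem.Set.empty (by simp [PySem.Set.empty])


-- the two characterising conditions agree
lemma pvCond (arr : List Int) :
    (∃ n ∈ List.map Nat.succ (List.range 1023), pvMsum arr n = 0)
      ↔ (0:Int) ∈ (List.range 10).foldl (pvStep arr) PySem.Set.empty := by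
  rw [pvBinv arr 10 (le_refl 10) 0]
  constructor
  · rintro ⟨n, hn, hs⟩
    simp only [List.mem_map, List.mem_range] at hn
    obtain ⟨m, hm, rfl⟩ := hn
    exact ⟨m + 1, by omega, by omega, hs⟩
  · rintro ⟨n, h2, h1, hs⟩
    refine ⟨n, ?_, hs⟩
    simp only [List.mem_map, List.mem_range]
    exact ⟨n - 1, by omega, by omega⟩

-- ===== VERDICT (by name: the statement is the Claim_ definition above) =====
theorem is_zero_subset_spec : Claim_equal_is_zero_subset := by
  intro arr _hdom _hpre
  unfold Spec_is_zero_subset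
  rw [pvAeq, pvBeq]
  exact if_congr (pvCond arr) rfl rfl
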